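-- pv_equiv track=rewrite | github.com/solidsnk86/Tecnicatura_UTN | python/logica_en_python/word_analytic.py | analytics
-- ===== SOURCE A (Python) =====
-- def analytics(word):
--     vowels = "aeiouAEIOUáéíóúÁÉÍÓÚ"
--     words = len(word.split())
--     counter = 0
--     for i in word:
--         if i in vowels:
--             counter += 1
--     return counter, words
-- ===== SOURCE B (Python) =====
-- def analytics(word):
--     freq = {}
--     for c in word:
--         freq[c] = freq.get(c, 0) + 1
--     vowels = "aeiouAEIOU\u00e1\u00e9\u00ed\u00f3\u00fa\u00c1\u00c9\u00cd\u00d3\u00da"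
--     return sum(freq.get(v, 0) for v in vowels), len(word.split())
-- ===== Notes on version B (the rewrite author's own statement) =====
-- stated objective: alternative
-- what changed: B builds a character-frequency dictionary in one pass and obtains the vowel total as the sum of 20 dictionary lookups over the fixed vowel alphabet, instead of A's per-character membership test against the vowel string.
import Mathlib
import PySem

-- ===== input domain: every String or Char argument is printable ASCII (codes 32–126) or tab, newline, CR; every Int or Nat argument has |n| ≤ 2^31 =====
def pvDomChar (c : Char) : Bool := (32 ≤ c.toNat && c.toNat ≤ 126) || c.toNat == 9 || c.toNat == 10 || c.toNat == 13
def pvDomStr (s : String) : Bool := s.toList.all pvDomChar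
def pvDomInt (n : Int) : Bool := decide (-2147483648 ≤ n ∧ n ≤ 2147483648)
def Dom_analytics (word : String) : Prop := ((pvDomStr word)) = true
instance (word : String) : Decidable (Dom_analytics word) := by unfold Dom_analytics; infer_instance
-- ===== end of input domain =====

-- B replaces A's per-character membership tally with a one-pass character-frequency
-- dictionary summed over the fixed vowel alphabet (objective: alternative algorithm).

-- ===== PORT A =====
def analytics (word : String) : Int × Int :=
  let vowels := "aeiouAEIOUáéíóúÁÉÍÓÚ"
  let words : Int := (PySem.Str.split₀ word).length
  let counter := word.toList.foldl
    (fun acc i => if PySem.Chars.isIn [i] vowels.toList then acc + 1 else acc) (0 : Int)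
  (counter, words)

-- ===== PORT B =====
def analytics_alt (word : String) : Int × Int :=
  let freq : PySem.Dict Char Int :=
    word.toList.foldl (fun d c => d.insert c (d.getD c 0 + 1)) PySem.Dict.empty
  let vowels := "aeiouAEIOUáéíóúÁÉÍÓÚ"
  ((vowels.toList.map (fun v => freq.getD v 0)).sum,
   ((PySem.Str.split₀ word).length : Int))

-- ===== PRECONDITION & SPEC =====
def Spec_analytics (word : String) (out : Int × Int) : Prop := out = analytics_alt word
instance (word : String) (out : Int × Int) : Decidable (Spec_analytics word out) := by unfold Spec_analytics; infer_instance

-- ===== CLAIM (what is proved, stated in full; the proofs are below) =====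
def Claim_equal_analytics : Prop := ∀ (word : String), Dom_analytics word → Spec_analytics word (analytics word)

-- ===== LEMMAS AND PROOFS =====

theorem isIn_singleton (c : Char) (l : List Char) :
    PySem.Chars.isIn [c] l = decide (c ∈ l) := by
  by_cases h : c ∈ l
  · have hinf : [c] <:+: l := by
      obtain ⟨s, t, rfl⟩ := List.mem_iff_append.mp h
      exact ⟨s, t, by simp⟩
    rw [(PySem.Chars.isIn_iff_infix [c] l).mpr hinf]
    simp [h]
  · have hninf : ¬ [c] <:+: l := fun hi => h (hi.sublist.subset (by simp))
    rw [(PySem.Chars.isIn_eq_false_iff [c] l).mpr hninf]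
    simp [h]

theorem countP_cons_nodup (v : Char) (vs : List Char) (hv : v ∉ vs) (s : List Char) :
    s.countP (fun c => decide (c = v) || decide (c ∈ vs)) =
      s.count v + s.countP (fun c => decide (c ∈ vs)) := by
  induction s with
  | nil => simp
  | cons a s ih =>
    simp only [List.countP_cons, List.count_cons, ih]
    by_cases h1 : a = v
    · subst h1
      have h2 : a ∉ vs := hv
      simp [h2]
      omega
    · by_cases h2 : a ∈ vs
      · simp [h1, h2]; omega
      · simp [h1, h2]

theorem sum_count_eq_countP (vs : List Char) (h : vs.Nodup) (s : List Char) :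
    (vs.map (fun v => s.count v)).sum = s.countP (fun c => decide (c ∈ vs)) := by
  induction vs with
  | nil => simp
  | cons v vs ih =>
    have hnd := List.nodup_cons.mp h
    simp only [List.map_cons, List.sum_cons, ih hnd.2, List.mem_cons]
    rw [show (fun c => decide (c = v ∨ c ∈ vs)) = (fun c => decide (c = v) || decide (c ∈ vs)) from by
      funext c; by_cases h1 : c = v <;> by_cases h2 : c ∈ vs <;> simp [h1, h2]]
    rw [countP_cons_nodup v vs hnd.1 s]

theorem cast_sum_map (l : List Char) (f : Char → Nat) :
    (l.map (fun v => (f v : Int))).sum = ((l.map f).sum : Int) := by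
  induction l with
  | nil => simp
  | cons a l ih => simp [ih]

-- ===== VERDICT (by name: the statement is the Claim_ definition above) =====


theorem analytics_spec : Claim_equal_analytics := by
  intro word _
  unfold Spec_analytics analytics analytics_alt
  have hA : word.toList.foldl
      (fun acc i => if PySem.Chars.isIn [i] "aeiouAEIOUáéíóúÁÉÍÓÚ".toList then acc + 1 else acc) (0 : Int)
      = (word.toList.countP (fun c => decide (c ∈ "aeiouAEIOUáéíóúÁÉÍÓÚ".toList)) : Int) := by
    rw [PySem.List.foldl_if_add_one
      (fun i => PySem.Chars.isIn [i] "aeiouAEIOUáéíóúÁÉÍÓÚ".toList) word.toList (0 : Int)]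
    simp only [isIn_singleton]
    simp
  have hB : ∀ v : Char,
      (word.toList.foldl (fun d c => d.insert c (d.getD c 0 + 1))
        (PySem.Dict.empty : PySem.Dict Char Int)).getD v 0 = (word.toList.count v : Int) := by
    intro v
    rw [PySem.Dict.getD_foldl_insert_add_one, PySem.Dict.getD_empty]
    simp
  simp only [hA, hB]
  refine Prod.ext ?_ rfl
  have hnd : ("aeiouAEIOUáéíóúÁÉÍÓÚ".toList).Nodup := by decide
  rw [cast_sum_map, sum_count_eq_countP _ hnd]
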